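-- pv_equiv track=rewrite | github.com/pokerdio/generic | cf/cf1678c.py | go
-- ===== SOURCE A (Python) =====
-- p0 = [5, 1, 6, 2, 8, 3, 4, 10, 9, 7]
--
-- n0 = len(p0)
--
-- def go(n=n0, p=p0):
--     v = [[0] * n for _ in range(n)]
--     prefix_v = [[0] * n for _ in range(n)]
--     for b in range(0, n):
--         kount_smol = 0
--         for d in range(n - 1, b, -1):
--             if p[b] > p[d]:
--                 kount_smol += 1
--             v[b][d] = kount_smol
--
--     prefix_v[0] = v[0].copy()
--     for b in range(1, n):
--         for x in range(n):
--             prefix_v[b][x] = v[b][x] + prefix_v[b - 1][x]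
--     ret = 0
--     for a in range(0, n - 3):
--         for c in range(a + 2, n - 1):
--             if p[a] < p[c]:
--                 delta = prefix_v[c - 1][c + 1] - prefix_v[a][c + 1]
--                 if delta > 0:
--                     ret += delta
--     return ret
-- ===== SOURCE B (Python) =====
-- p0 = [5, 1, 6, 2, 8, 3, 4, 10, 9, 7]
--
-- n0 = len(p0)
--
-- def go(n=n0, p=p0):
--     # direct definition: count quadruples a<b<c<d with p[a]<p[c] and p[b]>p[d]
--     ret = 0
--     for a in range(n):
--         for b in range(a + 1, n):
--             for c in range(b + 1, n):
--                 if p[a] < p[c]: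
--                     for d in range(c + 1, n):
--                         if p[b] > p[d]:
--                             ret += 1
--     return ret
-- ===== Notes on version B (the rewrite author's own statement) =====
-- stated objective: simpler
-- what changed: Replaced the two precomputed tables (per-position smaller-count rows and their column prefix sums) plus delta lookups by the direct four-nested-loop count of quadruples a<b<c<d with p[a]<p[c] and p[b]>p[d].
import Mathlib
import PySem

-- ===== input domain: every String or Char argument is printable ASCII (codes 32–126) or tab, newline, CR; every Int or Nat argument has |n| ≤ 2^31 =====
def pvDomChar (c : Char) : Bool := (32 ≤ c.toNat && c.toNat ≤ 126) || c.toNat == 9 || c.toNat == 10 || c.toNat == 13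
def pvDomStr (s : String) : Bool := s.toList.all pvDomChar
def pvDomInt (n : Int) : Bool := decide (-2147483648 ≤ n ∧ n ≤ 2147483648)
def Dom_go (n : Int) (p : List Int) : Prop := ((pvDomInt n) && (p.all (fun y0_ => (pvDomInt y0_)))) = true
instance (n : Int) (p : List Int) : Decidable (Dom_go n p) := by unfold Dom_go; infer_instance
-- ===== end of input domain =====

-- B replaces A's count/prefix-sum tables by the direct four-nested-loop count of the same quadruples (simpler, not faster).


-- ===== PORT A =====
-- p[i]: all accesses of both programs are at nonnegative in-range indices under Pre_go, where getD 0 is exact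
def pget (p : List Int) (i : Int) : Int := PySem.List.pyGetD p i 0

-- v = [[0]*n for _ in range(n)]; row b is only written during iteration b of the fill loop, so the
-- fill loop is rendered as a per-row map; kount_smol and the d-loop are the inner fold (d ≥ 0, so .toNat is exact)
def goV (n : Int) (p : List Int) : List (List Int) :=
  (PySem.List.pyRange 0 n).map (fun b =>
    ((PySem.List.pyRange (n - 1) b (-1)).foldl
      (fun (st : Int × List Int) d =>
        let k := if pget p b > pget p d then st.1 + 1 else st.1
        (k, st.2.set d.toNat k))
      (0, List.replicate n.toNat 0)).2)

-- prefix_v = [[0]*n for _ in range(n)]; prefix_v[0] = v[0].copy();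
-- for b in range(1, n): for x in range(n): prefix_v[b][x] = v[b][x] + prefix_v[b-1][x]
def goPv (n : Int) (p : List Int) : List (List Int) :=
  (PySem.List.pyRange 1 n).foldl
    (fun pv b =>
      pv.set b.toNat
        ((PySem.List.pyRange 0 n).foldl
          (fun r x =>
            r.set x.toNat (((goV n p).getD b.toNat []).getD x.toNat 0 + (pv.getD (b - 1).toNat []).getD x.toNat 0))
          (pv.getD b.toNat [])))
    (((PySem.List.pyRange 0 n).map (fun _ => List.replicate n.toNat 0)).set 0 ((goV n p).getD 0 []))

def go (n : Int) (p : List Int) : Int :=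
  (PySem.List.pyRange 0 (n - 3)).foldl
    (fun ret a =>
      (PySem.List.pyRange (a + 2) (n - 1)).foldl
        (fun ret c =>
          if pget p a < pget p c then
            let delta := ((goPv n p).getD (c - 1).toNat []).getD (c + 1).toNat 0
                         - ((goPv n p).getD a.toNat []).getD (c + 1).toNat 0
            if delta > 0 then ret + delta else ret
          else ret)
        ret)
    0

-- ===== PORT B =====
def go_alt (n : Int) (p : List Int) : Int :=
  (PySem.List.pyRange 0 n).foldl (fun ret a =>
    (PySem.List.pyRange (a + 1) n).foldl (fun ret b =>
      (PySem.List.pyRange (b + 1) n).foldl (fun ret c =>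
        if pget p a < pget p c then
          (PySem.List.pyRange (c + 1) n).foldl (fun ret d =>
            if pget p b > pget p d then ret + 1 else ret) ret
        else ret) ret) ret) 0

-- ===== PRECONDITION & SPEC =====
-- Pre_go excludes exactly the inputs where the Python A raises IndexError: n ≤ 0 (it reads v[0] of an
-- empty table) and n > len(p) with n ≥ 2 (it indexes p past its end); n = 1 returns 0 for any p.
def Pre_go (n : Int) (p : List Int) : Prop := n = 1 ∨ (1 ≤ n ∧ n ≤ p.length)
instance (n : Int) (p : List Int) : Decidable (Pre_go n p) := by unfold Pre_go; infer_instance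
def pvWitness_go : Int × List Int := (4, [3, 1, 4, 2])

def Spec_go (n : Int) (p : List Int) (out : Int) : Prop := out = go_alt n p
instance (n : Int) (p : List Int) (out : Int) : Decidable (Spec_go n p out) := by unfold Spec_go; infer_instance

-- ===== CLAIM (what is proved, stated in full; the proofs are below) =====
def Claim_equal_go : Prop := ∀ (n : Int) (p : List Int), Dom_go n p → Pre_go n p → Spec_go n p (go n p)

-- ===== LEMMAS AND PROOFS =====

lemma sum_map_range (m : Nat) (f : Nat → Int) :
    ((List.range m).map f).sum = ∑ i ∈ Finset.range m, f i := rfl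

lemma sum_map_pyRange (a b : Nat) (f : Int → Int) :
    ((PySem.List.pyRange (a : Int) (b : Int)).map f).sum = ∑ x ∈ Finset.Ico a b, f (x : Int) := by
  rw [PySem.List.pyRange_one, Finset.sum_Ico_eq_sum_range]
  have h : (((b : Int)) - (a : Int)).toNat = b - a := by omega
  rw [h, List.map_map, sum_map_range]
  apply Finset.sum_congr rfl
  intro k _
  simp only [Function.comp_apply]
  congr 1

def cntQ (p : List Int) (N b x : Nat) : Int :=
  (((PySem.List.pyRange (x : Int) (N : Int)).countP (fun d => decide (pget p (b : Int) > pget p d)) : Nat) : Int)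

lemma foldl_if_add {α : Type} (P : α → Prop) [DecidablePred P] (g : α → Int) (l : List α) (init : Int) :
    l.foldl (fun acc x => if P x then acc + g x else acc) init
      = init + (l.map (fun x => if P x then g x else 0)).sum := by
  have h : (fun (acc : Int) x => if P x then acc + g x else acc)
      = fun acc x => acc + (if P x then g x else 0) := by
    funext acc x; split <;> simp
  rw [h, PySem.List.foldl_add]

lemma go_alt_closed (p : List Int) (N : Nat) :
    go_alt (N : Int) p
      = ∑ a ∈ Finset.range N, ∑ b ∈ Finset.Ico (a + 1) N, ∑ c ∈ Finset.Ico (b + 1) N,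
          (if pget p (a : Int) < pget p (c : Int) then cntQ p N b (c + 1) else 0) := by
  unfold go_alt
  simp only [PySem.List.foldl_ite_add_one, foldl_if_add, PySem.List.foldl_add, zero_add]
  rw [PySem.List.pyRange_zero]
  rw [List.map_map, sum_map_range]
  apply Finset.sum_congr rfl
  intro a _
  have h1 : (a : Int) + 1 = ((a + 1 : Nat) : Int) := by push_cast; ring
  rw [Function.comp_apply, h1, sum_map_pyRange]
  apply Finset.sum_congr rfl
  intro b hb
  have h2 : (b : Int) + 1 = ((b + 1 : Nat) : Int) := by push_cast; ring
  rw [h2, sum_map_pyRange]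
  apply Finset.sum_congr rfl
  intro c hc
  have h3 : (c : Int) + 1 = ((c + 1 : Nat) : Int) := by push_cast; ring
  rw [h3]
  unfold cntQ
  rfl

lemma cntQ_top (p : List Int) (N b : Nat) : cntQ p N b N = 0 := by
  unfold cntQ
  rw [PySem.List.pyRange_one]
  simp

lemma closed_eq (p : List Int) (N : Nat) :
    (∑ a ∈ Finset.range N, ∑ b ∈ Finset.Ico (a + 1) N, ∑ c ∈ Finset.Ico (b + 1) N,
        (if pget p (a : Int) < pget p (c : Int) then cntQ p N b (c + 1) else 0))
      = ∑ a ∈ Finset.range (N - 3), ∑ c ∈ Finset.Ico (a + 2) (N - 1),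
          (if pget p (a : Int) < pget p (c : Int)
           then ∑ b ∈ Finset.Ico (a + 1) c, cntQ p N b (c + 1) else 0) := by
  -- step 1: per a, swap the b and c sums
  have step1 : ∀ a : Nat,
      (∑ b ∈ Finset.Ico (a + 1) N, ∑ c ∈ Finset.Ico (b + 1) N,
          (if pget p (a : Int) < pget p (c : Int) then cntQ p N b (c + 1) else 0))
        = ∑ c ∈ Finset.Ico (a + 1) N,
            (if pget p (a : Int) < pget p (c : Int)
             then ∑ b ∈ Finset.Ico (a + 1) c, cntQ p N b (c + 1) else 0) := by
    intro a
    set G : Nat → Nat → Int := fun b c =>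
      if b < c then (if pget p (a : Int) < pget p (c : Int) then cntQ p N b (c + 1) else 0) else 0 with hG
    have lhs_eq : ∀ b ∈ Finset.Ico (a + 1) N,
        (∑ c ∈ Finset.Ico (b + 1) N,
            (if pget p (a : Int) < pget p (c : Int) then cntQ p N b (c + 1) else 0))
          = ∑ c ∈ Finset.Ico b N, G b c := by
      intro b hb
      rw [Finset.mem_Ico] at hb
      rw [Finset.sum_eq_sum_Ico_succ_bot (by omega : b < N)]
      simp only [hG, lt_irrefl, if_false, zero_add]
      apply Finset.sum_congr rfl
      intro c hc
      rw [Finset.mem_Ico] at hc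
      rw [if_pos (by omega : b < c)]
    rw [Finset.sum_congr rfl lhs_eq, Finset.sum_Ico_Ico_comm]
    apply Finset.sum_congr rfl
    intro c hc
    rw [Finset.mem_Ico] at hc
    rw [Finset.sum_Ico_succ_top (by omega : a + 1 ≤ c)]
    simp only [hG, lt_irrefl, if_false, add_zero]
    by_cases hp : pget p (a : Int) < pget p (c : Int)
    · rw [if_pos hp]
      apply Finset.sum_congr rfl
      intro b hb
      rw [Finset.mem_Ico] at hb
      rw [if_pos (show b < c by omega), if_pos hp]
    · rw [if_neg hp]
      apply Finset.sum_eq_zero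
      intro b hb
      rw [Finset.mem_Ico] at hb
      rw [if_pos (show b < c by omega), if_neg hp]
  -- step 2: shrink the c range, then the a range
  have step2 : ∀ a : Nat, a < N →
      (∑ c ∈ Finset.Ico (a + 1) N,
          (if pget p (a : Int) < pget p (c : Int)
           then ∑ b ∈ Finset.Ico (a + 1) c, cntQ p N b (c + 1) else 0))
        = ∑ c ∈ Finset.Ico (a + 2) (N - 1),
            (if pget p (a : Int) < pget p (c : Int)
             then ∑ b ∈ Finset.Ico (a + 1) c, cntQ p N b (c + 1) else 0) := by
    intro a ha
    symm
    apply Finset.sum_subset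
    · intro c hc
      rw [Finset.mem_Ico] at hc ⊢
      omega
    · intro c hc hc'
      rw [Finset.mem_Ico] at hc
      rw [Finset.mem_Ico] at hc'
      have hcases : c = a + 1 ∨ c = N - 1 := by omega
      rcases hcases with h | h
      · subst h
        simp
      · subst h
        have hz : ∀ b ∈ Finset.Ico (a + 1) (N - 1), cntQ p N b ((N - 1) + 1) = 0 := by
          intro b _
          have : (N - 1) + 1 = N := by omega
          rw [this, cntQ_top]
        rw [Finset.sum_congr rfl hz]
        simp
  calc (∑ a ∈ Finset.range N, ∑ b ∈ Finset.Ico (a + 1) N, ∑ c ∈ Finset.Ico (b + 1) N,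
        (if pget p (a : Int) < pget p (c : Int) then cntQ p N b (c + 1) else 0))
      = ∑ a ∈ Finset.range N, ∑ c ∈ Finset.Ico (a + 2) (N - 1),
          (if pget p (a : Int) < pget p (c : Int)
           then ∑ b ∈ Finset.Ico (a + 1) c, cntQ p N b (c + 1) else 0) := by
        apply Finset.sum_congr rfl
        intro a ha
        rw [Finset.mem_range] at ha
        rw [step1 a, step2 a ha]
    _ = ∑ a ∈ Finset.range (N - 3), ∑ c ∈ Finset.Ico (a + 2) (N - 1),
          (if pget p (a : Int) < pget p (c : Int)
           then ∑ b ∈ Finset.Ico (a + 1) c, cntQ p N b (c + 1) else 0) := by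
        symm
        apply Finset.sum_subset
        · intro a ha
          rw [Finset.mem_range] at ha ⊢
          omega
        · intro a ha ha'
          rw [Finset.mem_range] at ha ha'
          have : Finset.Ico (a + 2) (N - 1) = ∅ := by
            apply Finset.Ico_eq_empty
            omega
          rw [this, Finset.sum_empty]

def rowQ (p : List Int) (N b z : Nat) : List Int :=
  (List.range N).map (fun j => if z ≤ j then cntQ p N b j else 0)

lemma cntQ_cons (p : List Int) (N b x : Nat) (h : x < N) :
    cntQ p N b x = (if pget p (b : Int) > pget p (x : Int) then 1 else 0) + cntQ p N b (x + 1) := by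
  unfold cntQ
  rw [PySem.List.pyRange_one_cons (by omega : (x : Int) < (N : Int))]
  rw [List.countP_cons]
  have : ((x : Int)) + 1 = ((x + 1 : Nat) : Int) := by push_cast; ring
  rw [this]
  push_cast
  by_cases hx : pget p (b : Int) > pget p ((x : Nat) : Int)
  · simp [hx]; ring
  · simp [hx]

lemma rowQ_set (p : List Int) (N b t : Nat) :
    (rowQ p N b (t + 1)).set t (cntQ p N b t) = rowQ p N b t := by
  unfold rowQ
  apply List.ext_getElem
  · simp
  · intro i h1 h2
    simp only [List.length_set, List.length_map, List.length_range] at h1 h2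
    rw [List.getElem_set]
    simp only [List.getElem_map, List.getElem_range]
    split <;> rename_i hi
    · subst hi; rw [if_pos (le_refl t)]
    · by_cases ht : t ≤ i
      · rw [if_pos (by omega), if_pos ht]
      · rw [if_neg (by omega), if_neg ht]

lemma rowfold (p : List Int) (N b : Nat) :
    ∀ (m t : Nat), b ≤ t → t + m = N - 1 →
      ((PySem.List.pyRange ((N : Int) - 1) (t : Int) (-1)).foldl
        (fun (st : Int × List Int) d =>
          let k := if pget p (b : Int) > pget p d then st.1 + 1 else st.1
          (k, st.2.set d.toNat k))
        (0, List.replicate N 0))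
      = (cntQ p N b (t + 1), rowQ p N b (t + 1)) := by
  intro m
  induction m with
  | zero =>
    intro t hbt ht
    rw [PySem.List.pyRange_neg_one_eq_nil (by omega : (N : Int) - 1 ≤ (t : Int))]
    rw [List.foldl_nil]
    have h1 : cntQ p N b (t + 1) = 0 := by
      unfold cntQ
      rw [PySem.List.pyRange_one_eq_nil (by omega : (N : Int) ≤ ((t + 1 : Nat) : Int))]
      simp
    have h2 : rowQ p N b (t + 1) = List.replicate N 0 := by
      unfold rowQ
      rw [List.eq_replicate_iff]
      constructor
      · simp
      · intro x hx
        rw [List.mem_map] at hx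
        obtain ⟨j, hj, rfl⟩ := hx
        rw [List.mem_range] at hj
        rw [if_neg (by omega)]
    rw [h1, h2]
  | succ m ih =>
    intro t hbt ht
    have hdec : PySem.List.pyRange ((N : Int) - 1) (t : Int) (-1)
        = PySem.List.pyRange ((N : Int) - 1) ((t : Int) + 1) (-1) ++ [((t : Int) + 1)] := by
      rw [PySem.List.pyRange_neg_one_eq_reverse, PySem.List.pyRange_neg_one_eq_reverse]
      rw [PySem.List.pyRange_one_cons (by omega : (t : Int) + 1 < (N : Int) - 1 + 1)]
      rw [List.reverse_cons]
    rw [hdec, List.foldl_append]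
    have hcast : (t : Int) + 1 = ((t + 1 : Nat) : Int) := by push_cast; ring
    rw [hcast, ih (t + 1) (by omega) (by omega)]
    simp only [List.foldl_cons, List.foldl_nil]
    have htoNat : ((t + 1 : Nat) : Int).toNat = t + 1 := by omega
    rw [htoNat]
    have hk : (if pget p (b : Int) > pget p ((t + 1 : Nat) : Int) then cntQ p N b (t + 1 + 1) + 1
        else cntQ p N b (t + 1 + 1)) = cntQ p N b (t + 1) := by
      rw [cntQ_cons p N b (t + 1) (by omega)]
      by_cases hx : pget p (b : Int) > pget p ((t + 1 : Nat) : Int)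
      · rw [if_pos hx, if_pos hx]; ring
      · rw [if_neg hx, if_neg hx]; ring
    show ((if pget p (b : Int) > pget p ((t + 1 : Nat) : Int) then cntQ p N b (t + 1 + 1) + 1
        else cntQ p N b (t + 1 + 1)),
        (rowQ p N b (t + 1 + 1)).set (t + 1)
          (if pget p (b : Int) > pget p ((t + 1 : Nat) : Int) then cntQ p N b (t + 1 + 1) + 1
        else cntQ p N b (t + 1 + 1))) = _
    rw [hk, rowQ_set p N b (t + 1)]

lemma goV_getD (p : List Int) (N b : Nat) (hb : b < N) :
    (goV (N : Int) p).getD b [] = rowQ p N b (b + 1) := by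
  unfold goV
  rw [PySem.List.pyRange_zero]
  have htoNat : ((N : Int)).toNat = N := by omega
  rw [htoNat]
  rw [List.getD_eq_getElem _ _ (by simp [hb])]
  simp only [List.getElem_map, List.getElem_range]
  have := rowfold p N b (N - 1 - b) b (le_refl b) (by omega)
  rw [this]

def rvQ (p : List Int) (N b x : Nat) : Int := if b < x then cntQ p N b x else 0

def ppQ (p : List Int) (N j x : Nat) : Int := ∑ b ∈ Finset.range (j + 1), rvQ p N b x

def ppRowQ (p : List Int) (N j : Nat) : List Int := (List.range N).map (fun x => ppQ p N j x)

def pvRowsQ (p : List Int) (N t : Nat) : List (List Int) :=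
  (List.range N).map (fun j => if j ≤ t then ppRowQ p N j else List.replicate N 0)

lemma foldl_set_range (g : Nat → Int) :
    ∀ (m : Nat) (r : List Int), m ≤ r.length →
      (List.range m).foldl (fun r' x => r'.set x (g x)) r = (List.range m).map g ++ r.drop m := by
  intro m
  induction m with
  | zero => intro r _; simp
  | succ m ih =>
    intro r hm
    rw [List.range_succ, List.foldl_append, ih r (by omega)]
    simp only [List.foldl_cons, List.foldl_nil]
    rw [List.set_append_right _ _ (by simp)]
    rw [List.drop_eq_getElem_cons (by omega : m < r.length)]
    simp only [List.length_map, List.length_range, Nat.sub_self]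
    rw [List.set_cons_zero]
    rw [List.map_append]
    simp

lemma rowQ_getD (p : List Int) (N b z x : Nat) (hx : x < N) :
    (rowQ p N b z).getD x 0 = if z ≤ x then cntQ p N b x else 0 := by
  unfold rowQ
  rw [List.getD_eq_getElem _ _ (by simp [hx])]
  simp

lemma ppRowQ_getD (p : List Int) (N j x : Nat) (hx : x < N) :
    (ppRowQ p N j).getD x 0 = ppQ p N j x := by
  unfold ppRowQ
  rw [List.getD_eq_getElem _ _ (by simp [hx])]
  simp

lemma pvRowsQ_getD_le (p : List Int) (N s j : Nat) (hj : j < N) (hle : j ≤ s) :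
    (pvRowsQ p N s).getD j [] = ppRowQ p N j := by
  unfold pvRowsQ
  rw [List.getD_eq_getElem _ _ (by simp [hj])]
  simp [hle]

lemma pvRowsQ_getD_gt (p : List Int) (N s j : Nat) (hj : j < N) (hgt : s < j) :
    (pvRowsQ p N s).getD j [] = List.replicate N 0 := by
  unfold pvRowsQ
  rw [List.getD_eq_getElem _ _ (by simp [hj])]
  have : ¬ (j ≤ s) := by omega
  simp [this]

lemma pvRowsQ_set (p : List Int) (N t : Nat) (h1 : 1 ≤ t) :
    (pvRowsQ p N (t - 1)).set t (ppRowQ p N t) = pvRowsQ p N t := by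
  unfold pvRowsQ
  apply List.ext_getElem
  · simp
  · intro i h1' h2'
    simp only [List.length_set, List.length_map, List.length_range] at h1' h2'
    rw [List.getElem_set]
    simp only [List.getElem_map, List.getElem_range]
    split <;> rename_i hi
    · subst hi; rw [if_pos (le_refl t)]
    · by_cases hit : i ≤ t - 1
      · rw [if_pos hit, if_pos (by omega)]
      · rw [if_neg hit, if_neg (by omega)]

lemma pvRowsQ_base (p : List Int) (N : Nat) :
    ((List.range N).map (fun _ => List.replicate N (0 : Int))).set 0 (ppRowQ p N 0)
      = pvRowsQ p N 0 := by
  unfold pvRowsQ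
  apply List.ext_getElem
  · simp
  · intro i h1' h2'
    simp only [List.length_set, List.length_map, List.length_range] at h1' h2'
    rw [List.getElem_set]
    simp only [List.getElem_map, List.getElem_range]
    split <;> rename_i hi
    · subst hi; rw [if_pos (le_refl 0)]
    · rw [if_neg (by omega)]

lemma rowQ_zero_eq_ppRowQ (p : List Int) (N : Nat) :
    rowQ p N 0 1 = ppRowQ p N 0 := by
  unfold rowQ ppRowQ
  apply List.ext_getElem
  · simp
  · intro i h1' h2'
    simp only [List.length_map, List.length_range] at h1' h2'
    simp only [List.getElem_map, List.getElem_range]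
    unfold ppQ rvQ
    rw [Finset.sum_range_one]
    by_cases h : 1 ≤ i
    · rw [if_pos h, if_pos (by omega)]
    · rw [if_neg h, if_neg (by omega)]

lemma inner_row (p : List Int) (N t : Nat) (hN1 : 1 ≤ t) (htN : t < N) :
    (List.range N).map (fun x =>
        ((goV (N : Int) p).getD t []).getD x 0 + ((pvRowsQ p N (t - 1)).getD (t - 1) []).getD x 0)
      = ppRowQ p N t := by
  unfold ppRowQ
  apply List.ext_getElem
  · simp
  · intro i h1' h2'
    simp only [List.length_map, List.length_range] at h1' h2'
    simp only [List.getElem_map, List.getElem_range]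
    rw [goV_getD p N t htN, rowQ_getD p N t (t + 1) i h1']
    rw [pvRowsQ_getD_le p N (t - 1) (t - 1) (by omega) (le_refl _)]
    rw [ppRowQ_getD p N (t - 1) i h1']
    unfold ppQ
    have hsplit : t - 1 + 1 = t := by omega
    rw [hsplit, Finset.sum_range_succ]
    unfold rvQ
    by_cases h : t + 1 ≤ i
    · rw [if_pos h, if_pos (by omega)]; ring
    · rw [if_neg h, if_neg (by omega)]; ring

lemma pvfold (p : List Int) (N : Nat) (hN : 1 ≤ N) :
    ∀ t : Nat, 1 ≤ t → t ≤ N →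
      (PySem.List.pyRange 1 (t : Int)).foldl
        (fun pv b =>
          pv.set b.toNat
            ((PySem.List.pyRange 0 (N : Int)).foldl
              (fun r x =>
                r.set x.toNat (((goV (N : Int) p).getD b.toNat []).getD x.toNat 0 + (pv.getD (b - 1).toNat []).getD x.toNat 0))
              (pv.getD b.toNat [])))
        (((PySem.List.pyRange 0 (N : Int)).map (fun _ => List.replicate (N : Int).toNat 0)).set 0 ((goV (N : Int) p).getD 0 []))
      = pvRowsQ p N (t - 1) := by
  intro t h1
  induction t, h1 using Nat.le_induction with
  | base =>
    intro _
    have hnil : PySem.List.pyRange 1 ((1 : Nat) : Int) = [] :=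
      PySem.List.pyRange_one_eq_nil (by omega)
    rw [hnil, List.foldl_nil]
    rw [goV_getD p N 0 (by omega), rowQ_zero_eq_ppRowQ]
    rw [PySem.List.pyRange_zero]
    have h2 : ((N : Int)).toNat = N := by omega
    rw [h2, List.map_map]
    have h3 : (List.range N).map ((fun _ => List.replicate N (0 : Int)) ∘ (fun k : Nat => (k : Int)))
        = (List.range N).map (fun _ => List.replicate N (0 : Int)) := rfl
    rw [h3, pvRowsQ_base p N]
  | succ t ht ih =>
    intro htN
    have hdec : PySem.List.pyRange 1 ((t + 1 : Nat) : Int)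
        = PySem.List.pyRange 1 (t : Int) ++ [(t : Int)] := by
      rw [PySem.List.pyRange_one_append 1 (t : Int) ((t + 1 : Nat) : Int) (by omega) (by omega)]
      congr 1
      rw [PySem.List.pyRange_one_cons (by omega : (t : Int) < ((t + 1 : Nat) : Int))]
      rw [PySem.List.pyRange_one_eq_nil (by omega)]
    rw [hdec, List.foldl_append, ih (by omega)]
    simp only [List.foldl_cons, List.foldl_nil]
    have htoNat : ((t : Int)).toNat = t := by omega
    rw [htoNat]
    -- the starting row for the inner loop is the untouched all-zero row t
    rw [pvRowsQ_getD_gt p N (t - 1) t (by omega) (by omega)]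
    -- inner loop: turn pyRange into range and apply foldl_set_range
    rw [PySem.List.pyRange_zero]
    have h2 : ((N : Int)).toNat = N := by omega
    rw [h2, List.foldl_map]
    have hsets :
        (List.range N).foldl
          (fun (r : List Int) (x : Nat) =>
            r.set ((x : Int)).toNat
              (((goV (N : Int) p).getD t []).getD ((x : Int)).toNat 0
                + ((pvRowsQ p N (t - 1)).getD ((t : Int) - 1).toNat []).getD ((x : Int)).toNat 0))
          (List.replicate N 0)
        = (List.range N).map (fun x =>
            ((goV (N : Int) p).getD t []).getD x 0 + ((pvRowsQ p N (t - 1)).getD (t - 1) []).getD x 0) := by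
      have hfun : ∀ (r : List Int) (x : Nat),
          r.set ((x : Int)).toNat
              (((goV (N : Int) p).getD t []).getD ((x : Int)).toNat 0
                + ((pvRowsQ p N (t - 1)).getD ((t : Int) - 1).toNat []).getD ((x : Int)).toNat 0)
            = r.set x (((goV (N : Int) p).getD t []).getD x 0
                + ((pvRowsQ p N (t - 1)).getD (t - 1) []).getD x 0) := by
        intro r x
        have e1 : ((x : Int)).toNat = x := by omega
        have e2 : ((t : Int) - 1).toNat = t - 1 := by omega
        rw [e1, e2]
      rw [PySem.List.foldl_congr_mem _ _ _ _ (fun r x _ => hfun r x)]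
      rw [foldl_set_range _ N (List.replicate N 0) (by simp)]
      simp
    rw [hsets, inner_row p N t ht (by omega)]
    rw [pvRowsQ_set p N t ht]
    congr 1

lemma goPv_eq (p : List Int) (N : Nat) (hN : 1 ≤ N) :
    goPv (N : Int) p = pvRowsQ p N (N - 1) := by
  unfold goPv
  exact pvfold p N hN N hN (le_refl N)

lemma ite_add_shift (Q : Prop) [Decidable Q] (r d : Int) :
    (if Q then r + d else r) = r + (if Q then d else 0) := by split <;> simp

lemma cntQ_nonneg (p : List Int) (N b x : Nat) : 0 ≤ cntQ p N b x := by
  unfold cntQ; positivity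

lemma go_closed (p : List Int) (N : Nat) (hN : 1 ≤ N) :
    go (N : Int) p
      = ∑ a ∈ Finset.range (N - 3), ∑ c ∈ Finset.Ico (a + 2) (N - 1),
          (if pget p (a : Int) < pget p (c : Int)
           then ∑ b ∈ Finset.Ico (a + 1) c, cntQ p N b (c + 1) else 0) := by
  unfold go
  rw [goPv_eq p N hN]
  simp only [ite_add_shift, PySem.List.foldl_add, zero_add]
  rw [PySem.List.pyRange_zero]
  have h3 : ((N : Int) - 3).toNat = N - 3 := by omega
  rw [h3, List.map_map, sum_map_range]
  apply Finset.sum_congr rfl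
  intro a ha
  rw [Finset.mem_range] at ha
  simp only [Function.comp_apply]
  have e1 : ((a : Nat) : Int) + 2 = ((a + 2 : Nat) : Int) := by push_cast; ring
  have e2 : ((N : Int)) - 1 = ((N - 1 : Nat) : Int) := by omega
  rw [e1, e2, sum_map_pyRange]
  apply Finset.sum_congr rfl
  intro c hc
  rw [Finset.mem_Ico] at hc
  have e3 : (((c : Nat) : Int) - 1).toNat = c - 1 := by omega
  have e4 : (((c : Nat) : Int) + 1).toNat = c + 1 := by omega
  have e5 : (((a : Nat) : Int)).toNat = a := by omega
  rw [e3, e4, e5]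
  rw [pvRowsQ_getD_le p N (N - 1) (c - 1) (by omega) (by omega)]
  rw [pvRowsQ_getD_le p N (N - 1) a (by omega) (by omega)]
  rw [ppRowQ_getD p N (c - 1) (c + 1) (by omega)]
  rw [ppRowQ_getD p N a (c + 1) (by omega)]
  have hdelta : ppQ p N (c - 1) (c + 1) - ppQ p N a (c + 1)
      = ∑ b ∈ Finset.Ico (a + 1) c, cntQ p N b (c + 1) := by
    unfold ppQ
    have hc1 : c - 1 + 1 = c := by omega
    rw [hc1]
    rw [Finset.sum_Ico_eq_sub _ (by omega : a + 1 ≤ c)]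
    have hr : ∀ m : Nat, m ≤ c →
        ∑ b ∈ Finset.range m, rvQ p N b (c + 1) = ∑ b ∈ Finset.range m, cntQ p N b (c + 1) := by
      intro m hm
      apply Finset.sum_congr rfl
      intro b hb
      rw [Finset.mem_range] at hb
      unfold rvQ
      rw [if_pos (by omega)]
    rw [hr c (le_refl c), hr (a + 1) (by omega)]
  rw [hdelta]
  have hnn : 0 ≤ ∑ b ∈ Finset.Ico (a + 1) c, cntQ p N b (c + 1) :=
    Finset.sum_nonneg (fun b _ => cntQ_nonneg p N b (c + 1))
  have hpos : (if (∑ b ∈ Finset.Ico (a + 1) c, cntQ p N b (c + 1)) > 0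
      then (∑ b ∈ Finset.Ico (a + 1) c, cntQ p N b (c + 1)) else 0)
      = ∑ b ∈ Finset.Ico (a + 1) c, cntQ p N b (c + 1) := by
    by_cases h : (∑ b ∈ Finset.Ico (a + 1) c, cntQ p N b (c + 1)) > 0
    · rw [if_pos h]
    · rw [if_neg h]; omega
  rw [hpos]

-- ===== VERDICT (by name: the statement is the Claim_ definition above) =====
theorem go_spec : Claim_equal_go := by
  intro n p _ hpre
  unfold Spec_go
  have hn1 : 1 ≤ n := by unfold Pre_go at hpre; rcases hpre with h | ⟨h, _⟩ <;> omega
  obtain ⟨N, rfl⟩ : ∃ N : Nat, n = (N : Int) := ⟨n.toNat, by omega⟩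
  have hN : 1 ≤ N := by exact_mod_cast hn1
  rw [go_closed p N hN, go_alt_closed p N, closed_eq p N]
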